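-- pv_equiv track=rewrite | github.com/kh277/BOJ | 백준/Silver/20309. 트리플 소트/트리플 소트.py | solve
-- ===== SOURCE A (Python) =====
-- def solve(N, A):
--     odd = [A[i] for i in range(0, N, 2)]
--     even = [A[i] for i in range(1, N, 2)]
--
--     odd.sort()
--     even.sort()
--
--     for i in range(len(even)):
--         if even[i] != 2*(i+1):
--             return 'NO'
--
--     for i in range(len(odd)):
--         if odd[i] != 2*i+1:
--             return 'NO'
--
--     return 'YES'
-- ===== SOURCE B (Python) =====
-- def solve(N, A):
--     # One pass: position i (0-based) must hold a value of the opposite parity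
--     # of i, within 1..N, and no value may repeat.  By counting, that holds
--     # iff each sorted half is exactly the odd/even sequence A checks.
--     seen = set()
--     for i in range(N):
--         v = A[i]
--         if v < 1 or v > N or v in seen or v % 2 == i % 2:
--             return 'NO'
--         seen.add(v)
--     return 'YES'
-- ===== Notes on version B (the rewrite author's own statement) =====
-- stated objective: faster
-- what changed: Instead of splitting into two halves, sorting each, and comparing to the target sequences, B makes a single pass with a seen-set checking that position i holds an unrepeated value in 1..N of the opposite parity of i, which by counting is equivalent.
import Mathlib
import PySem

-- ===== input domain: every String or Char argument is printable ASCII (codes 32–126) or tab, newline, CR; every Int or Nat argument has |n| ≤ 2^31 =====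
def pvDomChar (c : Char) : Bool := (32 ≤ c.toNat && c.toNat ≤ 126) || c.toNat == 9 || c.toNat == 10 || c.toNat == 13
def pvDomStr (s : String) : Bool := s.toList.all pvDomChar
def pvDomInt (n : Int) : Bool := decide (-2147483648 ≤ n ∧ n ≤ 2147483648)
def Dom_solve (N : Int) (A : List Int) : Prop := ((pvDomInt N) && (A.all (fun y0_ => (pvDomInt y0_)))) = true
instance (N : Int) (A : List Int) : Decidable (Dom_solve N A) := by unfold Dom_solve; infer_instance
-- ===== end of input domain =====

-- B replaces sort-each-half-and-compare by a single counting pass with a seen-set: asymptotically faster.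

-- ===== PORT A =====
def solve (N : Int) (A : List Int) : String :=
  let odd := (PySem.List.pyRange 0 N 2).map (fun i => PySem.List.pyGetD A i 0)
  let even := (PySem.List.pyRange 1 N 2).map (fun i => PySem.List.pyGetD A i 0)
  let oddS := PySem.List.sorted odd (fun x => x) false
  let evenS := PySem.List.sorted even (fun x => x) false
  -- the two early-return loops, as short-circuit checks in the same order
  if (List.range evenS.length).all (fun i => evenS.getD i 0 == 2*((i : Int)+1)) then
    if (List.range oddS.length).all (fun i => oddS.getD i 0 == 2*(i : Int)+1) then "YES"
    else "NO"
  else "NO"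

-- ===== PORT B =====
def solveAltGo (N : Int) (A : List Int) : List Int → PySem.Set Int → String
  | [], _ => "YES"
  | i :: rest, seen =>
    let v := PySem.List.pyGetD A i 0
    if v < 1 ∨ N < v ∨ v ∈ seen ∨ PySem.Int.mod v 2 = PySem.Int.mod i 2 then "NO"
    else solveAltGo N A rest (PySem.Set.add seen v)

def solve_alt (N : Int) (A : List Int) : String :=
  solveAltGo N A (PySem.List.pyRange 0 N 1) PySem.Set.empty

-- ===== PRECONDITION & SPEC =====
-- Pre_: exactly the inputs where the Python A returns (A[i] raises IndexError when N > len(A)).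
def Pre_solve (N : Int) (A : List Int) : Prop := N ≤ (A.length : Int)
instance (N : Int) (A : List Int) : Decidable (Pre_solve N A) := by unfold Pre_solve; infer_instance

def pvWitness_solve : Int × List Int := (4, [1, 2, 3, 4])

def Spec_solve (N : Int) (A : List Int) (out : String) : Prop := out = solve_alt N A
instance (N : Int) (A : List Int) (out : String) : Decidable (Spec_solve N A out) := by unfold Spec_solve; infer_instance

-- ===== CLAIM (what is proved, stated in full; the proofs are below) =====
def Claim_equal_solve : Prop := ∀ (N : Int) (A : List Int), Dom_solve N A → Pre_solve N A → Spec_solve N A (solve N A)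

-- ===== LEMMAS AND PROOFS =====

-- B's loop returns "YES" iff every visited index holds an in-range value of the right
-- parity, the produced values are pairwise distinct, and none is already in `seen`.
theorem solveAltGo_eq_yes_iff (N : Int) (A : List Int) :
    ∀ (r : List Int) (s : PySem.Set Int),
    solveAltGo N A r s = "YES" ↔
      ((∀ i ∈ r, 1 ≤ PySem.List.pyGetD A i 0 ∧ PySem.List.pyGetD A i 0 ≤ N ∧
          PySem.Int.mod (PySem.List.pyGetD A i 0) 2 ≠ PySem.Int.mod i 2)
       ∧ (r.map (fun i => PySem.List.pyGetD A i 0)).Nodup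
       ∧ (∀ i ∈ r, PySem.List.pyGetD A i 0 ∉ s)) := by
  intro r
  induction r with
  | nil => intro s; simp [solveAltGo]
  | cons i rest ih =>
    intro s
    by_cases h : PySem.List.pyGetD A i 0 < 1 ∨ N < PySem.List.pyGetD A i 0 ∨
        PySem.List.pyGetD A i 0 ∈ s ∨
        PySem.Int.mod (PySem.List.pyGetD A i 0) 2 = PySem.Int.mod i 2
    · rw [solveAltGo, if_pos h]
      simp only [List.mem_cons, List.map_cons, List.nodup_cons]
      constructor
      · intro hc; exact absurd hc (by simp)
      · rintro ⟨hgood, ⟨hnotin, hnd⟩, hs⟩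
        rcases h with h | h | h | h
        · have := (hgood i (Or.inl rfl)).1; omega
        · have := (hgood i (Or.inl rfl)).2.1; omega
        · exact absurd h (hs i (Or.inl rfl))
        · exact absurd h (hgood i (Or.inl rfl)).2.2
    · rw [solveAltGo, if_neg h]
      push Not at h
      obtain ⟨h1, h2, h3, h4⟩ := h
      rw [ih (PySem.Set.add s (PySem.List.pyGetD A i 0))]
      simp only [List.mem_cons, List.map_cons, List.nodup_cons, List.mem_map,
        PySem.Set.mem_add]
      constructor
      · rintro ⟨hgood, hnd, hs⟩
        refine ⟨?_, ⟨?_, hnd⟩, ?_⟩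
        · rintro j (rfl | hj)
          · exact ⟨by omega, by omega, h4⟩
          · exact hgood j hj
        · rintro ⟨j, hj, hje⟩
          exact (hs j hj) (Or.inr hje)
        · rintro j (rfl | hj)
          · exact fun hin => h3 hin
          · intro hin; exact (hs j hj) (Or.inl hin)
      · rintro ⟨hgood, ⟨hnotin, hnd⟩, hs⟩
        refine ⟨fun j hj => hgood j (Or.inr hj), hnd, ?_⟩
        intro j hj
        rintro (hin | heq)
        · exact (hs j (Or.inr hj)) hin
        · exact hnotin ⟨j, hj, heq⟩

-- the element-wise getD check of A's loops says exactly "this list IS the target list"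
theorem all_getD_iff (L : List Int) (f : Nat → Int) :
    (((List.range L.length).all (fun i => L.getD i 0 == f i)) = true) ↔
      L = (List.range L.length).map f := by
  simp only [List.all_eq_true, List.mem_range, beq_iff_eq]
  constructor
  · intro h
    apply List.ext_getElem (by simp)
    intro i h1 h2
    have := h i h1
    rw [List.getD_eq_getElem L 0 h1] at this
    simpa using this
  · intro h i hi
    conv_lhs => rw [h]
    rw [List.getD_eq_getElem _ 0 (by simpa using hi)]
    simp

-- a strictly increasing target: sorted xs = T  ↔  xs has no duplicates and lives in T
theorem sorted_eq_target_iff (xs T : List Int)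
    (hlen : xs.length = T.length) (hT : T.Pairwise (· < ·)) :
    PySem.List.sorted xs (fun x => x) false = T ↔ xs.Nodup ∧ ∀ v ∈ xs, v ∈ T := by
  have hTnd : T.Nodup := hT.imp (fun h => ne_of_lt h)
  constructor
  · intro h
    have hperm : T.Perm xs := h ▸ PySem.List.sorted_perm xs (fun x => x) false
    exact ⟨hperm.nodup hTnd, fun v hv => hperm.mem_iff.mpr hv⟩
  · rintro ⟨hnd, hsub⟩
    have hsp : xs.Subperm T := hnd.subperm hsub
    have hperm : xs.Perm T := hsp.perm_of_length_le (by omega)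
    exact PySem.List.sorted_eq_of_perm_of_pairwise_lt xs T (fun x => x) hperm.symm hT

-- membership in the odd target sequence [1,3,…], counted against N
theorem mem_oddsT (m : Nat) (N : Int) (hm : (m : Int) = (N+1)/2) (_hN : 0 < N) (v : Int) :
    v ∈ (List.range m).map (fun (k : Nat) => (2*(k : Int)+1)) ↔ (1 ≤ v ∧ v ≤ N ∧ v % 2 = 1) := by
  simp only [List.mem_map, List.mem_range]
  constructor
  · rintro ⟨k, hk, rfl⟩
    have hk' : (k : Int) < (m : Int) := by exact_mod_cast hk
    omega
  · rintro ⟨h1, h2, h3⟩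
    refine ⟨(v/2).toNat, ?_, ?_⟩ <;> omega

-- membership in the even target sequence [2,4,…], counted against N
theorem mem_evensT (m : Nat) (N : Int) (hm : (m : Int) = N/2) (_hN : 0 < N) (v : Int) :
    v ∈ (List.range m).map (fun (k : Nat) => (2*((k : Int)+1))) ↔ (1 ≤ v ∧ v ≤ N ∧ v % 2 = 0) := by
  simp only [List.mem_map, List.mem_range]
  constructor
  · rintro ⟨k, hk, rfl⟩
    have hk' : (k : Int) < (m : Int) := by exact_mod_cast hk
    omega
  · rintro ⟨h1, h2, h3⟩
    refine ⟨(v/2 - 1).toNat, ?_, ?_⟩ <;> omega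

theorem nodup_pyRange_two (a b : Int) : (PySem.List.pyRange a b 2).Nodup := by
  rw [PySem.List.pyRange_of_pos a b (by norm_num)]
  exact (List.nodup_range).map (fun x y h => by omega)

theorem length_pyRange_two (a b : Int) (h : a < b) :
    ((PySem.List.pyRange a b 2).length : Int) = (b - a + 1) / 2 := by
  rw [PySem.List.pyRange_of_pos a b (by norm_num)]
  rw [List.length_map, List.length_range, if_pos h]
  omega

-- ===== VERDICT (by name: the statement is the Claim_ definition above) =====
theorem solve_spec : Claim_equal_solve := by
  intro N A _ _
  unfold Spec_solve
  by_cases hN : N ≤ 0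
  · have e2 : PySem.List.pyRange 0 N 2 = [] := by
      rw [PySem.List.pyRange_of_pos 0 N (by norm_num), if_neg (by omega)]; simp
    have e2' : PySem.List.pyRange 1 N 2 = [] := by
      rw [PySem.List.pyRange_of_pos 1 N (by norm_num), if_neg (by omega)]; simp
    have e1 : PySem.List.pyRange 0 N 1 = [] := PySem.List.pyRange_one_eq_nil (by omega)
    simp [solve, solve_alt, e1, e2, e2', solveAltGo]
  · push Not at hN
    set g : Int → Int := fun i => PySem.List.pyGetD A i 0 with hg
    set Ro := PySem.List.pyRange 0 N 2 with hRo
    set Re := PySem.List.pyRange 1 N 2 with hRe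
    -- memberships
    have memRo : ∀ i, i ∈ Ro ↔ 0 ≤ i ∧ i < N ∧ 2 ∣ i := by
      intro i; rw [hRo, PySem.List.mem_pyRange_iff_of_pos (by norm_num)]
      constructor <;> rintro ⟨x, y, z⟩ <;> exact ⟨x, y, by omega⟩
    have memRe : ∀ i, i ∈ Re ↔ 1 ≤ i ∧ i < N ∧ 2 ∣ (i - 1) := by
      intro i; rw [hRe, PySem.List.mem_pyRange_iff_of_pos (by norm_num)]
    have memR1 : ∀ i, i ∈ PySem.List.pyRange 0 N 1 ↔ (i ∈ Ro ∨ i ∈ Re) := by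
      intro i
      rw [PySem.List.mem_pyRange_one, memRo, memRe]
      omega
    -- the one-step range is a permutation of the two two-step ranges
    have hdisj : ∀ i, i ∈ Ro → i ∈ Re → False := by
      intro i h1 h2; rw [memRo] at h1; rw [memRe] at h2; omega
    have hndapp : (Ro ++ Re).Nodup := by
      rw [List.nodup_append]
      exact ⟨nodup_pyRange_two 0 N, nodup_pyRange_two 1 N,
        by intro a ha b hb heq; exact hdisj a ha (by rwa [heq])⟩
    have hperm : (PySem.List.pyRange 0 N 1).Perm (Ro ++ Re) := by
      rw [List.perm_ext_iff_of_nodup (PySem.List.nodup_pyRange_one 0 N) hndapp]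
      intro a; rw [memR1, List.mem_append]
    -- lengths of the halves
    have hlenRo : (Ro.length : Int) = (N + 1) / 2 := by
      rw [hRo, length_pyRange_two 0 N (by omega)]; omega
    have hlenRe : (Re.length : Int) = N / 2 := by
      by_cases h1 : 1 < N
      · rw [hRe, length_pyRange_two 1 N h1]; omega
      · have : N = 1 := by omega
        subst this
        rw [hRe, PySem.List.pyRange_of_pos 1 1 (by norm_num), if_neg (by omega)]
        simp
    -- parity of the indices in each half
    have parRo : ∀ i ∈ Ro, PySem.Int.mod i 2 = 0 := by
      intro i hi; rw [memRo] at hi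
      rw [PySem.Int.mod_eq_emod_of_pos (by norm_num)]; omega
    have parRe : ∀ i ∈ Re, PySem.Int.mod i 2 = 1 := by
      intro i hi; rw [memRe] at hi
      rw [PySem.Int.mod_eq_emod_of_pos (by norm_num)]; omega
    -- characterize B
    have hB : solve_alt N A = "YES" ↔
        ((∀ i ∈ Ro, 1 ≤ g i ∧ g i ≤ N ∧ g i % 2 = 1)
         ∧ (∀ i ∈ Re, 1 ≤ g i ∧ g i ≤ N ∧ g i % 2 = 0)
         ∧ (Ro.map g).Nodup ∧ (Re.map g).Nodup
         ∧ ∀ v ∈ Ro.map g, v ∉ Re.map g) := by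
      rw [solve_alt, solveAltGo_eq_yes_iff]
      have hmg : ((PySem.List.pyRange 0 N 1).map g).Perm ((Ro ++ Re).map g) :=
        hperm.map g
      rw [hmg.nodup_iff, List.map_append, List.nodup_append]
      constructor
      · rintro ⟨hgood, ⟨hnd1, hnd2, hdj⟩, -⟩
        have hgood' : ∀ i, i ∈ Ro ∨ i ∈ Re →
            1 ≤ g i ∧ g i ≤ N ∧ PySem.Int.mod (g i) 2 ≠ PySem.Int.mod i 2 := by
          intro i hi; exact hgood i ((memR1 i).mpr hi)
        refine ⟨?_, ?_, hnd1, hnd2, fun v hv hv2 => hdj v hv v hv2 rfl⟩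
        · intro i hi
          obtain ⟨a, b, c⟩ := hgood' i (Or.inl hi)
          refine ⟨a, b, ?_⟩
          rw [parRo i hi] at c
          rcases PySem.Int.mod_two_eq (g i) with h | h
          · exact absurd h c
          · rw [PySem.Int.mod_eq_emod_of_pos (by norm_num)] at h; omega
        · intro i hi
          obtain ⟨a, b, c⟩ := hgood' i (Or.inr hi)
          refine ⟨a, b, ?_⟩
          rw [parRe i hi] at c
          rcases PySem.Int.mod_two_eq (g i) with h | h
          · rw [PySem.Int.mod_eq_emod_of_pos (by norm_num)] at h; omega
          · exact absurd h c
      · rintro ⟨ho, he, hnd1, hnd2, hdj⟩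
        refine ⟨?_, ⟨hnd1, hnd2, by intro a ha b hb heq; exact hdj a ha (heq ▸ hb)⟩, by simp [PySem.Set.empty]⟩
        intro i hi
        rcases (memR1 i).mp hi with hi' | hi'
        · obtain ⟨a, b, c⟩ := ho i hi'
          refine ⟨a, b, ?_⟩
          rw [parRo i hi', PySem.Int.mod_eq_emod_of_pos (by norm_num)]
          have c' : PySem.List.pyGetD A i 0 % 2 = 1 := c
          omega
        · obtain ⟨a, b, c⟩ := he i hi'
          refine ⟨a, b, ?_⟩
          rw [parRe i hi', PySem.Int.mod_eq_emod_of_pos (by norm_num)]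
          have c' : PySem.List.pyGetD A i 0 % 2 = 0 := c
          omega
    -- characterize A
    have hOddT : PySem.List.sorted (Ro.map g) (fun x => x) false
          = (List.range (Ro.map g).length).map (fun (k : Nat) => (2*(k : Int)+1))
        ↔ (Ro.map g).Nodup ∧ ∀ i ∈ Ro, 1 ≤ g i ∧ g i ≤ N ∧ g i % 2 = 1 := by
      rw [sorted_eq_target_iff _ _ (by simp) (by
        rw [List.pairwise_map]
        refine List.pairwise_lt_range.imp ?_
        intro a b h; omega)]
      have : ∀ v, v ∈ (List.range (Ro.map g).length).map (fun (k : Nat) => (2*(k : Int)+1)) ↔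
          (1 ≤ v ∧ v ≤ N ∧ v % 2 = 1) := by
        intro v
        exact mem_oddsT _ N (by rw [List.length_map]; exact hlenRo) hN v
      constructor
      · rintro ⟨hnd, hmem⟩
        exact ⟨hnd, fun i hi => (this (g i)).mp (hmem (g i) (List.mem_map_of_mem hi))⟩
      · rintro ⟨hnd, hmem⟩
        refine ⟨hnd, ?_⟩
        intro v hv
        obtain ⟨i, hi, rfl⟩ := List.mem_map.mp hv
        exact (this (g i)).mpr (hmem i hi)
    have hEvenT : PySem.List.sorted (Re.map g) (fun x => x) false
          = (List.range (Re.map g).length).map (fun (k : Nat) => (2*((k : Int)+1)))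
        ↔ (Re.map g).Nodup ∧ ∀ i ∈ Re, 1 ≤ g i ∧ g i ≤ N ∧ g i % 2 = 0 := by
      rw [sorted_eq_target_iff _ _ (by simp) (by
        rw [List.pairwise_map]
        refine List.pairwise_lt_range.imp ?_
        intro a b h; omega)]
      have : ∀ v, v ∈ (List.range (Re.map g).length).map (fun (k : Nat) => (2*((k : Int)+1))) ↔
          (1 ≤ v ∧ v ≤ N ∧ v % 2 = 0) := by
        intro v
        exact mem_evensT _ N (by rw [List.length_map]; exact hlenRe) hN v
      constructor
      · rintro ⟨hnd, hmem⟩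
        exact ⟨hnd, fun i hi => (this (g i)).mp (hmem (g i) (List.mem_map_of_mem hi))⟩
      · rintro ⟨hnd, hmem⟩
        refine ⟨hnd, ?_⟩
        intro v hv
        obtain ⟨i, hi, rfl⟩ := List.mem_map.mp hv
        exact (this (g i)).mpr (hmem i hi)
    have hA : solve N A = "YES" ↔
        (((Ro.map g).Nodup ∧ ∀ i ∈ Ro, 1 ≤ g i ∧ g i ≤ N ∧ g i % 2 = 1)
         ∧ ((Re.map g).Nodup ∧ ∀ i ∈ Re, 1 ≤ g i ∧ g i ≤ N ∧ g i % 2 = 0)) := by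
      rw [solve]
      simp only [← hRo, ← hRe, ← hg]
      rw [← hOddT, ← hEvenT]
      set oS := PySem.List.sorted (Ro.map g) (fun x => x) false with hoS
      set eS := PySem.List.sorted (Re.map g) (fun x => x) false with heS
      have hol : oS.length = (Ro.map g).length := PySem.List.length_sorted _ _ _
      have hel : eS.length = (Re.map g).length := PySem.List.length_sorted _ _ _
      rw [← hol, ← hel]
      split_ifs with c1 c2
      · simp only [true_iff]
        exact ⟨(all_getD_iff oS _).mp c2, (all_getD_iff eS _).mp c1⟩
      · constructor
        · intro h; exact absurd h (by decide)
        · rintro ⟨h2, -⟩; exact absurd ((all_getD_iff oS _).mpr h2) (by simpa using c2)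
      · constructor
        · intro h; exact absurd h (by decide)
        · rintro ⟨-, h1⟩; exact absurd ((all_getD_iff eS _).mpr h1) (by simpa using c1)
    -- both programs return "YES" or "NO" only; agree iff the YES-conditions agree
    have hBvals : solve_alt N A = "YES" ∨ solve_alt N A = "NO" := by
      rw [solve_alt]
      generalize PySem.List.pyRange 0 N 1 = r
      generalize (PySem.Set.empty : PySem.Set Int) = s
      induction r generalizing s with
      | nil => left; rfl
      | cons i rest ih =>
        rw [solveAltGo]
        split_ifs
        · right; rfl
        · exact ih _
    have hAvals : solve N A = "YES" ∨ solve N A = "NO" := by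
      rw [solve]
      split_ifs <;> simp
    -- close the equivalence
    have hiff : solve N A = "YES" ↔ solve_alt N A = "YES" := by
      rw [hA, hB]
      constructor
      · rintro ⟨⟨hnd1, ho⟩, ⟨hnd2, he⟩⟩
        refine ⟨ho, he, hnd1, hnd2, ?_⟩
        intro v hv hv2
        obtain ⟨i, hi, rfl⟩ := List.mem_map.mp hv
        obtain ⟨j, hj, hje⟩ := List.mem_map.mp hv2
        have h1 := (ho i hi).2.2
        have h2 := (he j hj).2.2
        rw [hje] at h2; omega
      · rintro ⟨ho, he, hnd1, hnd2, -⟩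
        exact ⟨⟨hnd1, ho⟩, ⟨hnd2, he⟩⟩
    rcases hAvals with hA' | hA' <;> rcases hBvals with hB' | hB'
    · rw [hA', hB']
    · exact absurd (hiff.mp hA') (by rw [hB']; decide)
    · exact absurd (hiff.mpr hB') (by rw [hA']; decide)
    · rw [hA', hB']
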